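-- pv_equiv track=rewrite | github.com/AndrewDGillen/DIGITtally-Backend | GOIAgglomerator.py | check_against_needs
-- ===== SOURCE A (Python) =====
-- def check_against_needs(flytype_sub_dictionary, weight_dict_for_source, outputbyhit, tmpobs, obstarget, updateids):
--
--     currentscore = {}
--
--     obligationsmet = {}
--
--     for flytype in flytype_sub_dictionary:
--
--         if weight_dict_for_source[flytype] != 0:
--
--             for hit in outputbyhit:
--                 datafound = 0
--
--                 if hit not in currentscore:
--                     currentscore[hit] = 0
--                     obligationsmet[hit] = 0
--
--                 weightmod = weight_dict_for_source[flytype]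
--
--                 if hit in flytype_sub_dictionary[flytype]:
--                     currentscore[hit] += (1 * weightmod)
--                     datafound = 1
--
--                     #This flags up when a gene is expressed in an obligatory fly type
--                     if flytype in tmpobs:
--                         obligationsmet[hit] += 1
--
--                 #This catches edge cases where the old ID is used in FlyAtlas1 but the newer ID in FlyAtlas2
--                 if hit in updateids and datafound == 0:
--                     if updateids[hit] in flytype_sub_dictionary[flytype]:
--                         currentscore[hit] += (1 * weight_dict_for_source[flytype])
--                         datafound = 1
--
--                         if flytype in tmpobs:
--                             obligationsmet[hit] += 1
--
--     #This block checks that every putative gene of interest passes the measurement metric in all obligate fly types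
--     #If not, the score for that metric is reduced to 0
--     for hit in currentscore:
--         if obligationsmet[hit] >= obstarget:
--             outputbyhit[hit].append(currentscore[hit])
--         else:
--             outputbyhit[hit].append(0)
--
--     return outputbyhit
-- ===== SOURCE B (Python) =====
-- def check_against_needs(flytype_sub_dictionary, weight_dict_for_source, outputbyhit, tmpobs, obstarget, updateids):
--     active = {ft: weight_dict_for_source[ft] for ft in flytype_sub_dictionary
--               if weight_dict_for_source[ft] != 0}
--     if not active:
--         return outputbyhit
--
--     # inverted index: expressed gene id -> set of active flytypes expressing it
--     index = {}
--     for ft in active: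
--         for member in flytype_sub_dictionary[ft]:
--             index.setdefault(member, set()).add(ft)
--
--     obset = set(tmpobs)
--     for hit in outputbyhit:
--         matched = set(index.get(hit, ()))
--         if hit in updateids:
--             matched |= index.get(updateids[hit], set())
--         score = sum(active[ft] for ft in matched)
--         obligations = sum(1 for ft in matched if ft in obset)
--         outputbyhit[hit].append(score if obligations >= obstarget else 0)
--     return outputbyhit
-- ===== Notes on version B (the rewrite author's own statement) =====
-- stated objective: alternative
-- what changed: B replaces A's per-(flytype,hit) membership scans and intermediate currentscore/obligationsmet dicts by an inverted index built once (gene id -> set of active flytypes expressing it); each hit's score and obligation count are then sums over its matched flytype set (union of the index entries for the hit and its updated id).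
import Mathlib
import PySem

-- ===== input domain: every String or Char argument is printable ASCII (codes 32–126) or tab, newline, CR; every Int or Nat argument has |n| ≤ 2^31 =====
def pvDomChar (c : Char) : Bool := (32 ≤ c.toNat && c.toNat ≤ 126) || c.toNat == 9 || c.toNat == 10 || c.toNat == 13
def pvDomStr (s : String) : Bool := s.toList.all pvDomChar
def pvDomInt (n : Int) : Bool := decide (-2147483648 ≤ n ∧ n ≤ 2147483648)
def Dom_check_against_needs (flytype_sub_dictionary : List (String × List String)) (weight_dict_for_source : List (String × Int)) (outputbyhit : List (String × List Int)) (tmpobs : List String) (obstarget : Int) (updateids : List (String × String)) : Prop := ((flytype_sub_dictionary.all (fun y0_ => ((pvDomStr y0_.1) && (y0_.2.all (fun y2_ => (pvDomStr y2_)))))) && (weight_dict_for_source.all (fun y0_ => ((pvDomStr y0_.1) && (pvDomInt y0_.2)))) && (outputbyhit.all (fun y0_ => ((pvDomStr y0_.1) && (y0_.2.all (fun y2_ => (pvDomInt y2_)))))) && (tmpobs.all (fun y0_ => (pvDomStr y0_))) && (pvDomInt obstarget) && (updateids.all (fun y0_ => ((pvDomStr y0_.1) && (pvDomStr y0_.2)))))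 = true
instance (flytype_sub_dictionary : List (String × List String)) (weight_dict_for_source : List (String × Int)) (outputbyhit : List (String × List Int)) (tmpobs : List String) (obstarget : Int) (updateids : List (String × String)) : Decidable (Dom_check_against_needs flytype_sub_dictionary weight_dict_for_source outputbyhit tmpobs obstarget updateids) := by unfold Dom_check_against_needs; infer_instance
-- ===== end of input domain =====

-- B replaces A's per-(flytype,hit) membership scans by an inverted index (gene -> set of
-- active flytypes expressing it); each hit's score/obligations are sums over its matched set.
-- Both Pythons mutate outputbyhit in place by the same appends; the equivalence proved here is about the return value.

-- ===== PORT A =====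
-- inner loop body of A: one hit processed for one flytype; state = (currentscore, obligationsmet)
def aHitStep (sub : List String) (weightmod : Int) (obligate : Bool)
    (updateids : List (String × String))
    (st : PySem.Dict String Int × PySem.Dict String Int) (hit : String) :
    PySem.Dict String Int × PySem.Dict String Int :=
  let st := if st.1.contains hit then st else (st.1.insert hit 0, st.2.insert hit 0)
  if sub.contains hit then
    (st.1.insert hit (st.1.getD hit 0 + 1 * weightmod),
     if obligate then st.2.insert hit (st.2.getD hit 0 + 1) else st.2)
  else
    match updateids.lookup hit with
    | some newid =>
        if sub.contains newid then
          (st.1.insert hit (st.1.getD hit 0 + 1 * weightmod),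
           if obligate then st.2.insert hit (st.2.getD hit 0 + 1) else st.2)
        else st
    | none => st

-- append currentscore (or 0) to outputbyhit[hit]  (Python: outputbyhit[hit].append(...))
def pvAppendAt (out : List (String × List Int)) (k : String) (v : Int) : List (String × List Int) :=
  match out with
  | [] => []
  | q :: rest => if q.1 = k then (q.1, q.2 ++ [v]) :: rest else q :: pvAppendAt rest k v

def check_against_needs (flytype_sub_dictionary : List (String × List String)) (weight_dict_for_source : List (String × Int)) (outputbyhit : List (String × List Int)) (tmpobs : List String) (obstarget : Int) (updateids : List (String × String)) : List (String × List Int) :=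
  let hits := outputbyhit.map Prod.fst
  let final := flytype_sub_dictionary.foldl (fun st p =>
      -- Python raises KeyError here when p.1 has no weight; excluded by Pre_
      if (weight_dict_for_source.lookup p.1).getD 0 ≠ 0 then
        hits.foldl (aHitStep p.2 ((weight_dict_for_source.lookup p.1).getD 0) (tmpobs.contains p.1) updateids) st
      else st)
    (PySem.Dict.empty, PySem.Dict.empty)
  final.1.keys.foldl (fun out hit =>
      pvAppendAt out hit (if final.2.getD hit 0 ≥ obstarget then final.1.getD hit 0 else 0)) outputbyhit

-- ===== PORT B =====
-- inverted index of Source B: for ft in active: for member in fsd[ft]: index.setdefault(member, set()).add(ft)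
def bBuildIndex (active : List (String × List String)) : PySem.Dict String (PySem.Set String) :=
  active.foldl (fun idx p =>
    p.2.foldl (fun idx m => idx.insert m (PySem.Set.add (idx.getD m []) p.1)) idx)
    PySem.Dict.empty

def check_against_needs_alt (flytype_sub_dictionary : List (String × List String)) (weight_dict_for_source : List (String × Int)) (outputbyhit : List (String × List Int)) (tmpobs : List String) (obstarget : Int) (updateids : List (String × String)) : List (String × List Int) :=
  -- active = {ft: wd[ft] for ft in fsd if wd[ft] != 0}; its values active[ft] are wd[ft]
  let active := flytype_sub_dictionary.filter (fun p => decide ((weight_dict_for_source.lookup p.1).getD 0 ≠ 0))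
  if active.isEmpty then outputbyhit
  else
    let index := bBuildIndex active
    let obset := PySem.Set.ofList tmpobs
    outputbyhit.map (fun q =>
      -- matched = set(index.get(hit, ())); if hit in updateids: matched |= index.get(updateids[hit], set())
      let matched : PySem.Set String :=
        match updateids.lookup q.1 with
        | some nid => PySem.Set.union (PySem.Set.ofList (index.getD q.1 [])) (index.getD nid [])
        | none => PySem.Set.ofList (index.getD q.1 [])
      -- sums over the matched set: order-independent, so exact despite Python's hash order
      let score := matched.foldl (fun s ft => s + (weight_dict_for_source.lookup ft).getD 0) 0
      let obligations := matched.foldl (fun c ft => if obset.contains ft then c + 1 else c) (0 : Int)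
      (q.1, q.2 ++ [if obligations ≥ obstarget then score else 0]))

-- ===== PRECONDITION & SPEC =====
-- Pre_ excludes (i) inputs where some flytype key has no entry in weight_dict_for_source — Python A raises
-- KeyError there — and (ii) association lists with duplicate keys, which do not represent any Python dict
-- (dict construction collapses them, so A never receives such an input).
def Pre_check_against_needs (flytype_sub_dictionary : List (String × List String)) (weight_dict_for_source : List (String × Int)) (outputbyhit : List (String × List Int)) (tmpobs : List String) (obstarget : Int) (updateids : List (String × String)) : Prop :=
  (∀ p ∈ flytype_sub_dictionary, (weight_dict_for_source.lookup p.1).isSome) ∧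
  (flytype_sub_dictionary.map Prod.fst).Nodup ∧
  (weight_dict_for_source.map Prod.fst).Nodup ∧
  (outputbyhit.map Prod.fst).Nodup ∧
  (updateids.map Prod.fst).Nodup
instance (flytype_sub_dictionary : List (String × List String)) (weight_dict_for_source : List (String × Int)) (outputbyhit : List (String × List Int)) (tmpobs : List String) (obstarget : Int) (updateids : List (String × String)) : Decidable (Pre_check_against_needs flytype_sub_dictionary weight_dict_for_source outputbyhit tmpobs obstarget updateids) := by unfold Pre_check_against_needs; infer_instance

def pvWitness_check_against_needs : (List (String × List String)) × (List (String × Int)) × (List (String × List Int)) × List String × Int × (List (String × String)) :=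
  ([("adult", ["g1"])], [("adult", 2)], [("g1", [5]), ("g2", [])], ["adult"], 1, [("g2", "g1")])

def Spec_check_against_needs (flytype_sub_dictionary : List (String × List String)) (weight_dict_for_source : List (String × Int)) (outputbyhit : List (String × List Int)) (tmpobs : List String) (obstarget : Int) (updateids : List (String × String)) (out : List (String × List Int)) : Prop := out = check_against_needs_alt flytype_sub_dictionary weight_dict_for_source outputbyhit tmpobs obstarget updateids
instance (flytype_sub_dictionary : List (String × List String)) (weight_dict_for_source : List (String × Int)) (outputbyhit : List (String × List Int)) (tmpobs : List String) (obstarget : Int) (updateids : List (String × String)) (out : List (String × List Int)) : Decidable (Spec_check_against_needs flytype_sub_dictionary weight_dict_for_source outputbyhit tmpobs obstarget updateids out) := by unfold Spec_check_against_needs; infer_instance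

-- ===== CLAIM (what is proved, stated in full; the proofs are below) =====
def Claim_equal_check_against_needs : Prop := ∀ (flytype_sub_dictionary : List (String × List String)) (weight_dict_for_source : List (String × Int)) (outputbyhit : List (String × List Int)) (tmpobs : List String) (obstarget : Int) (updateids : List (String × String)), Dom_check_against_needs flytype_sub_dictionary weight_dict_for_source outputbyhit tmpobs obstarget updateids → Pre_check_against_needs flytype_sub_dictionary weight_dict_for_source outputbyhit tmpobs obstarget updateids → Spec_check_against_needs flytype_sub_dictionary weight_dict_for_source outputbyhit tmpobs obstarget updateids (check_against_needs flytype_sub_dictionary weight_dict_for_source outputbyhit tmpobs obstarget updateids)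

-- ===== LEMMAS AND PROOFS =====

-- ---- A-side characterisation: per-hit value of A's dict state as a fold over the filtered flytype list ----

-- the (score, obligations) contribution of one flytype (with membership list sub, weight w, obligate flag obf) to one hit
def hitDelta (sub : List String) (w : Int) (obf : Bool) (up : List (String × String)) (hit : String) : Int × Int :=
  if sub.contains hit then (w, if obf then 1 else 0)
  else
    match up.lookup hit with
    | some nid => if sub.contains nid then (w, if obf then 1 else 0) else (0, 0)
    | none => (0, 0)

-- proof-side accumulator form of one flytype's contribution to one hit
def bHitScore (wd : List (String × Int)) (tmpobs : List String)
    (updateids : List (String × String)) (hit : String)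
    (acc : Int × Int) (p : String × List String) : Int × Int :=
  (acc.1 + (hitDelta p.2 ((wd.lookup p.1).getD 0) (tmpobs.contains p.1) updateids hit).1,
   acc.2 + (hitDelta p.2 ((wd.lookup p.1).getD 0) (tmpobs.contains p.1) updateids hit).2)

theorem aHitStep_getD_ne (sub : List String) (w : Int) (obf : Bool) (up : List (String × String))
    (st : PySem.Dict String Int × PySem.Dict String Int) (h hit : String) (hne : h ≠ hit) :
    ((aHitStep sub w obf up st h).1.getD hit 0 = st.1.getD hit 0) ∧
    ((aHitStep sub w obf up st h).2.getD hit 0 = st.2.getD hit 0) := by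
  unfold aHitStep
  cases hlk : up.lookup h <;>
    simp only [hlk] <;> split_ifs <;>
    simp [PySem.Dict.getD_insert, Ne.symm hne]

theorem aHitStep_keys (sub : List String) (w : Int) (obf : Bool) (up : List (String × String))
    (st : PySem.Dict String Int × PySem.Dict String Int) (h : String) (hP : st.1.keys = st.2.keys) :
    (aHitStep sub w obf up st h).1.keys = PySem.Set.add st.1.keys h ∧
    (aHitStep sub w obf up st h).2.keys = PySem.Set.add st.2.keys h := by
  have hc : st.1.contains h = st.2.contains h := by
    simp [PySem.Dict.contains_eq_decide_mem_keys, hP]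
  unfold aHitStep
  by_cases h1 : st.1.contains h
  · have h2 : st.2.contains h := by rw [← hc]; exact h1
    cases hlk : up.lookup h <;> simp only [hlk, h1, if_true] <;> split_ifs <;>
      simp [PySem.Dict.keys_insert_of_contains, h1, h2, PySem.Set.add,
        PySem.Dict.contains_eq_decide_mem_keys, PySem.Set.contains,
        ((PySem.Dict.contains_iff_mem_keys _ _).mp h1), ((PySem.Dict.contains_iff_mem_keys _ _).mp h2)]
  · have h2 : ¬ st.2.contains h = true := by rw [← hc]; exact h1
    cases hlk : up.lookup h <;> simp only [hlk, h1, if_false] <;> split_ifs <;>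
      simp [PySem.Dict.keys_insert_of_not_contains, h1, h2, PySem.Set.add,
        PySem.Dict.keys_insert_of_contains, PySem.Dict.contains_insert_self,
        PySem.Set.contains, PySem.Dict.contains_eq_decide_mem_keys] <;>
      simp_all [PySem.Dict.contains_eq_decide_mem_keys]

theorem aHitStep_getD_self (sub : List String) (w : Int) (obf : Bool) (up : List (String × String))
    (st : PySem.Dict String Int × PySem.Dict String Int) (hit : String) (hP : st.1.keys = st.2.keys) :
    ((aHitStep sub w obf up st hit).1.getD hit 0 = st.1.getD hit 0 + (hitDelta sub w obf up hit).1) ∧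
    ((aHitStep sub w obf up st hit).2.getD hit 0 = st.2.getD hit 0 + (hitDelta sub w obf up hit).2) := by
  have hc : st.1.contains hit = st.2.contains hit := by
    simp [PySem.Dict.contains_eq_decide_mem_keys, hP]
  unfold aHitStep hitDelta
  by_cases h1 : st.1.contains hit
  · have h2 : st.2.contains hit := by rw [← hc]; exact h1
    cases hlk : up.lookup hit <;> simp only [hlk, h1, if_true] <;> split_ifs <;>
      simp [PySem.Dict.getD_insert_self] <;> ring
  · have h2 : ¬ st.2.contains hit = true := by rw [← hc]; exact h1
    have g1 : st.1.getD hit 0 = 0 := PySem.Dict.getD_of_not_contains _ 0 (by simpa using h1)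
    have g2 : st.2.getD hit 0 = 0 := PySem.Dict.getD_of_not_contains _ 0 (by simpa using h2)
    cases hlk : up.lookup hit <;> simp only [hlk, h1, if_false] <;> split_ifs <;>
      simp [PySem.Dict.getD_insert_self, g1, g2] <;> ring

theorem inner_getD_not_mem (sub : List String) (w : Int) (obf : Bool) (up : List (String × String))
    (hits : List String) (st : PySem.Dict String Int × PySem.Dict String Int) (hit : String)
    (hm : hit ∉ hits) :
    ((hits.foldl (aHitStep sub w obf up) st).1.getD hit 0 = st.1.getD hit 0) ∧
    ((hits.foldl (aHitStep sub w obf up) st).2.getD hit 0 = st.2.getD hit 0) := by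
  induction hits generalizing st with
  | nil => exact ⟨rfl, rfl⟩
  | cons h hs ih =>
      have hne : h ≠ hit := by intro e; exact hm (by simp [e])
      have step := aHitStep_getD_ne sub w obf up st h hit hne
      have ihr := ih (aHitStep sub w obf up st h) (by intro e; exact hm (by simp [e]))
      simp only [List.foldl_cons]
      exact ⟨ihr.1.trans step.1, ihr.2.trans step.2⟩

theorem inner_keys (sub : List String) (w : Int) (obf : Bool) (up : List (String × String))
    (hits : List String) (st : PySem.Dict String Int × PySem.Dict String Int)
    (hP : st.1.keys = st.2.keys) :
    (hits.foldl (aHitStep sub w obf up) st).1.keys = PySem.Set.update st.1.keys hits ∧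
    (hits.foldl (aHitStep sub w obf up) st).1.keys = (hits.foldl (aHitStep sub w obf up) st).2.keys := by
  induction hits generalizing st with
  | nil => exact ⟨rfl, hP⟩
  | cons h hs ih =>
      have step := aHitStep_keys sub w obf up st h hP
      have hP' : (aHitStep sub w obf up st h).1.keys = (aHitStep sub w obf up st h).2.keys := by
        rw [step.1, step.2, hP]
      have ihr := ih (aHitStep sub w obf up st h) hP'
      refine ⟨?_, ihr.2⟩
      simp only [List.foldl_cons]
      rw [ihr.1, step.1, PySem.Set.update_cons]

theorem inner_getD_mem (sub : List String) (w : Int) (obf : Bool) (up : List (String × String))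
    (hits : List String) (st : PySem.Dict String Int × PySem.Dict String Int) (hit : String)
    (hnd : hits.Nodup) (hm : hit ∈ hits) (hP : st.1.keys = st.2.keys) :
    ((hits.foldl (aHitStep sub w obf up) st).1.getD hit 0 = st.1.getD hit 0 + (hitDelta sub w obf up hit).1) ∧
    ((hits.foldl (aHitStep sub w obf up) st).2.getD hit 0 = st.2.getD hit 0 + (hitDelta sub w obf up hit).2) := by
  induction hits generalizing st with
  | nil => cases hm
  | cons h hs ih =>
      have hP' : (aHitStep sub w obf up st h).1.keys = (aHitStep sub w obf up st h).2.keys := by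
        have step := aHitStep_keys sub w obf up st h hP
        rw [step.1, step.2, hP]
      simp only [List.foldl_cons]
      by_cases he : h = hit
      · subst he
        have hnm : h ∉ hs := (List.nodup_cons.mp hnd).1
        have rest := inner_getD_not_mem sub w obf up hs (aHitStep sub w obf up st h) h hnm
        have step := aHitStep_getD_self sub w obf up st h hP
        exact ⟨rest.1.trans step.1, rest.2.trans step.2⟩
      · have hm' : hit ∈ hs := by cases hm with | head => exact absurd rfl he | tail _ h2 => exact h2
        have step := aHitStep_getD_ne sub w obf up st h hit he
        have ihr := ih (aHitStep sub w obf up st h) (List.nodup_cons.mp hnd).2 hm' hP'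
        rw [ihr.1, ihr.2, step.1, step.2]
        exact ⟨rfl, rfl⟩

theorem set_update_of_subset {s : PySem.Set String} {l : List String} (h : ∀ x ∈ l, x ∈ s) :
    PySem.Set.update s l = s := by
  induction l generalizing s with
  | nil => rfl
  | cons x xs ih =>
      rw [PySem.Set.update_cons, PySem.Set.add_of_mem (h x (by simp))]
      exact ih (fun y hy => h y (by simp [hy]))

theorem foldl_appendAt_cons (v : String → Int) (ks : List String) (q : String × List Int)
    (rest : List (String × List Int)) (hq : q.1 ∉ ks) :
    ks.foldl (fun o hit => pvAppendAt o hit (v hit)) (q :: rest) =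
      q :: ks.foldl (fun o hit => pvAppendAt o hit (v hit)) rest := by
  induction ks generalizing rest with
  | nil => rfl
  | cons k ks ih =>
      have hne : q.1 ≠ k := by intro e; exact hq (by simp [e])
      simp only [List.foldl_cons, pvAppendAt]
      rw [if_neg hne]
      exact ih (pvAppendAt rest k (v k)) (by intro e; exact hq (by simp [e]))

theorem foldl_appendAt_keys (v : String → Int) (out : List (String × List Int))
    (hnd : (out.map Prod.fst).Nodup) :
    (out.map Prod.fst).foldl (fun o hit => pvAppendAt o hit (v hit)) out =
      out.map (fun q => (q.1, q.2 ++ [v q.1])) := by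
  induction out with
  | nil => rfl
  | cons q rest ih =>
      simp only [List.map_cons, List.nodup_cons] at hnd ⊢
      simp only [List.foldl_cons, pvAppendAt]
      simp only [if_true]
      rw [foldl_appendAt_cons v _ (q.1, q.2 ++ [v q.1]) rest hnd.1]
      rw [ih hnd.2]

theorem set_update_nil_eq_ofList (l : List String) :
    PySem.Set.update ([] : PySem.Set String) l = PySem.Set.ofList l := by
  rw [PySem.Set.ofList_eq_foldl]
  rfl

-- the outer loop of A, characterised per hit against a fold over the filtered flytype list
theorem outer_spec (fsd : List (String × List String)) (wd : List (String × Int))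
    (tmpobs : List String) (up : List (String × String)) (hits : List String) (hnd : hits.Nodup) :
    ((fsd.foldl (fun st p =>
        if (wd.lookup p.1).getD 0 ≠ 0 then
          hits.foldl (aHitStep p.2 ((wd.lookup p.1).getD 0) (tmpobs.contains p.1) up) st
        else st) (PySem.Dict.empty, PySem.Dict.empty)).1.keys
      = (fsd.foldl (fun st p =>
        if (wd.lookup p.1).getD 0 ≠ 0 then
          hits.foldl (aHitStep p.2 ((wd.lookup p.1).getD 0) (tmpobs.contains p.1) up) st
        else st) (PySem.Dict.empty, PySem.Dict.empty)).2.keys) ∧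
    ((fsd.foldl (fun st p =>
        if (wd.lookup p.1).getD 0 ≠ 0 then
          hits.foldl (aHitStep p.2 ((wd.lookup p.1).getD 0) (tmpobs.contains p.1) up) st
        else st) (PySem.Dict.empty, PySem.Dict.empty)).1.keys
      = if (fsd.filter (fun p => decide ((wd.lookup p.1).getD 0 ≠ 0))).isEmpty then []
        else PySem.Set.ofList hits) ∧
    (∀ hit ∈ hits,
      ((fsd.foldl (fun st p =>
        if (wd.lookup p.1).getD 0 ≠ 0 then
          hits.foldl (aHitStep p.2 ((wd.lookup p.1).getD 0) (tmpobs.contains p.1) up) st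
        else st) (PySem.Dict.empty, PySem.Dict.empty)).1.getD hit 0
        = ((fsd.filter (fun p => decide ((wd.lookup p.1).getD 0 ≠ 0))).foldl (bHitScore wd tmpobs up hit) (0, 0)).1) ∧
      ((fsd.foldl (fun st p =>
        if (wd.lookup p.1).getD 0 ≠ 0 then
          hits.foldl (aHitStep p.2 ((wd.lookup p.1).getD 0) (tmpobs.contains p.1) up) st
        else st) (PySem.Dict.empty, PySem.Dict.empty)).2.getD hit 0
        = ((fsd.filter (fun p => decide ((wd.lookup p.1).getD 0 ≠ 0))).foldl (bHitScore wd tmpobs up hit) (0, 0)).2)) := by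
  induction fsd using List.reverseRecOn with
  | nil =>
      refine ⟨rfl, by simp [PySem.Dict.keys_empty], ?_⟩
      intro hit _
      simp [PySem.Dict.getD_empty]
  | append_singleton l p ih =>
      obtain ⟨ihP, ihK, ihV⟩ := ih
      simp only [List.foldl_append, List.filter_append]
      by_cases hw : (wd.lookup p.1).getD 0 ≠ 0
      · simp only [List.foldl_cons, List.foldl_nil, if_pos hw, List.filter_cons, List.filter_nil,
          decide_eq_true_eq, hw, if_true, ite_true]
        have step := inner_keys p.2 ((wd.lookup p.1).getD 0) (tmpobs.contains p.1) up hits _ ihP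
        refine ⟨step.2, ?_, ?_⟩
        · rw [step.1, ihK]
          by_cases he : (l.filter (fun p => decide ((wd.lookup p.1).getD 0 ≠ 0))).isEmpty
          · simp only [he, if_true, ite_true]
            have : (l.filter (fun p => decide ((wd.lookup p.1).getD 0 ≠ 0)) ++ [p]).isEmpty = false := by
              simp
            rw [this]
            simp only [Bool.false_eq_true, if_false]
            exact set_update_nil_eq_ofList hits
          · simp only [he, if_false, ite_false]
            have : (l.filter (fun p => decide ((wd.lookup p.1).getD 0 ≠ 0)) ++ [p]).isEmpty = false := by
              simp
            rw [this]
            simp only [Bool.false_eq_true, if_false]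
            exact set_update_of_subset (fun x hx => by simp only [PySem.Set.mem_ofList]; exact hx)
        · intro hit hm
          have stepV := inner_getD_mem p.2 ((wd.lookup p.1).getD 0) (tmpobs.contains p.1) up hits _ hit hnd hm ihP
          constructor
          · rw [stepV.1, (ihV hit hm).1]; simp [bHitScore]
          · rw [stepV.2, (ihV hit hm).2]; simp [bHitScore]
      · simp only [List.foldl_cons, List.foldl_nil, if_neg hw, List.filter_cons,
          List.filter_nil, decide_eq_true_eq, hw, if_false, ite_false, List.append_nil]
        exact ⟨ihP, ihK, ihV⟩

-- ---- B-side: the inverted index's matched set recomputes the same per-hit fold ----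

-- the match predicate of one flytype entry for one hit (direct member, or via the updated id)
def bMatch (up : List (String × String)) (hit : String) (p : String × List String) : Bool :=
  p.2.contains hit || (match up.lookup hit with | some nid => p.2.contains nid | none => false)

theorem hitDelta_eq (up : List (String × String)) (hit : String) (p : String × List String)
    (w : Int) (obf : Bool) :
    hitDelta p.2 w obf up hit = if bMatch up hit p then (w, if obf then 1 else 0) else (0, 0) := by
  unfold hitDelta bMatch
  cases hlk : up.lookup hit <;> simp only [hlk] <;> split_ifs <;> simp_all

theorem idx_inner_mem (ftn : String) (members : List String)
    (idx : PySem.Dict String (PySem.Set String)) (m ft : String) :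
    (ft ∈ ((members.foldl (fun idx x => idx.insert x (PySem.Set.add (idx.getD x []) ftn)) idx).getD m [])) ↔
      ft ∈ idx.getD m [] ∨ (ft = ftn ∧ m ∈ members) := by
  induction members generalizing idx with
  | nil => simp
  | cons h hs ih =>
      simp only [List.foldl_cons]
      rw [ih]
      rw [PySem.Dict.getD_insert]
      by_cases he : m = h
      · subst he
        simp only [if_true, ite_true, PySem.Set.mem_add, List.mem_cons, eq_self_iff_true, true_or, if_pos]
        simp [PySem.Set.mem_add]
        tauto
      · simp only [if_neg he, List.mem_cons]
        tauto

theorem mem_buildIndex_aux (active : List (String × List String))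
    (idx : PySem.Dict String (PySem.Set String)) (m ft : String) :
    (ft ∈ ((active.foldl (fun idx p =>
        p.2.foldl (fun idx x => idx.insert x (PySem.Set.add (idx.getD x []) p.1)) idx) idx).getD m [])) ↔
      ft ∈ idx.getD m [] ∨ ∃ p ∈ active, p.1 = ft ∧ m ∈ p.2 := by
  induction active generalizing idx with
  | nil => simp
  | cons q qs ih =>
      simp only [List.foldl_cons]
      rw [ih, idx_inner_mem]
      simp only [List.mem_cons]
      constructor
      · rintro ((h | ⟨rfl, hm⟩) | ⟨p, hp, rfl, hm⟩)
        · exact Or.inl h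
        · exact Or.inr ⟨q, Or.inl rfl, rfl, hm⟩
        · exact Or.inr ⟨p, Or.inr hp, rfl, hm⟩
      · rintro (h | ⟨p, (rfl | hp), rfl, hm⟩)
        · exact Or.inl (Or.inl h)
        · exact Or.inl (Or.inr ⟨rfl, hm⟩)
        · exact Or.inr ⟨p, hp, rfl, hm⟩

theorem mem_buildIndex (active : List (String × List String)) (m ft : String) :
    (ft ∈ (bBuildIndex active).getD m []) ↔ ∃ p ∈ active, p.1 = ft ∧ m ∈ p.2 := by
  unfold bBuildIndex
  rw [mem_buildIndex_aux]
  simp [PySem.Dict.getD_empty]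

theorem foldl_add_g (g : String → Int) (l : List String) (c : Int) :
    l.foldl (fun s x => s + g x) c = c + (l.map g).sum := by
  induction l generalizing c with
  | nil => simp
  | cons x xs ih => simp only [List.foldl_cons, List.map_cons, List.sum_cons, ih]; ring

theorem foldl_count (pb : String → Bool) (l : List String) (c : Int) :
    l.foldl (fun s x => if pb x then s + 1 else s) c
      = c + (l.map (fun x => if pb x then (1 : Int) else 0)).sum := by
  induction l generalizing c with
  | nil => simp
  | cons x xs ih =>
      simp only [List.foldl_cons, List.map_cons, List.sum_cons]
      by_cases hx : pb x <;> simp [hx, ih] <;> ring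

theorem sum_map_ite {α : Type} (q : α → Bool) (g : α → Int) (l : List α) :
    (l.map (fun p => if q p then g p else 0)).sum = ((l.filter q).map g).sum := by
  induction l with
  | nil => rfl
  | cons x xs ih =>
      simp only [List.map_cons, List.sum_cons, List.filter_cons]
      by_cases hx : q x <;> simp [hx, ih]

theorem bfold (wd : List (String × Int)) (tmpobs : List String) (up : List (String × String))
    (hit : String) (F : List (String × List String)) (acc : Int × Int) :
    F.foldl (bHitScore wd tmpobs up hit) acc =
      (acc.1 + (F.map (fun p => (hitDelta p.2 ((wd.lookup p.1).getD 0) (tmpobs.contains p.1) up hit).1)).sum,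
       acc.2 + (F.map (fun p => (hitDelta p.2 ((wd.lookup p.1).getD 0) (tmpobs.contains p.1) up hit).2)).sum) := by
  induction F generalizing acc with
  | nil => simp
  | cons x xs ih =>
      simp only [List.foldl_cons, List.map_cons, List.sum_cons, ih]
      unfold bHitScore
      refine Prod.ext ?_ ?_ <;> simp <;> ring

theorem hitDelta_fst (up : List (String × String)) (hit : String) (p : String × List String)
    (w : Int) (obf : Bool) :
    (hitDelta p.2 w obf up hit).1 = if bMatch up hit p then w else 0 := by
  rw [hitDelta_eq]
  by_cases hb : bMatch up hit p <;> simp [hb]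

theorem hitDelta_snd (up : List (String × String)) (hit : String) (p : String × List String)
    (w : Int) (obf : Bool) :
    (hitDelta p.2 w obf up hit).2 = if bMatch up hit p then (if obf then 1 else 0) else 0 := by
  rw [hitDelta_eq]
  by_cases hb : bMatch up hit p <;> simp [hb]

theorem ofList_contains_eq (tmpobs : List String) (x : String) :
    (PySem.Set.ofList tmpobs).contains x = tmpobs.contains x := by
  by_cases hx : x ∈ tmpobs <;>
    simp [PySem.Set.contains_eq_listContains, List.contains_iff_mem, PySem.Set.mem_ofList, hx]

theorem matched_sums (wd : List (String × Int)) (tmpobs : List String)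
    (up : List (String × String)) (hit : String) (F : List (String × List String))
    (hndK : (F.map Prod.fst).Nodup) (M : List String) (hM : M.Nodup)
    (hmem : ∀ ft, ft ∈ M ↔ ∃ p ∈ F, p.1 = ft ∧ bMatch up hit p = true) :
    (M.foldl (fun s ft => s + (wd.lookup ft).getD 0) 0
      = (F.foldl (bHitScore wd tmpobs up hit) (0, 0)).1) ∧
    (M.foldl (fun c ft => if (PySem.Set.ofList tmpobs).contains ft then c + 1 else c) (0 : Int)
      = (F.foldl (bHitScore wd tmpobs up hit) (0, 0)).2) := by
  have hLnd : (((F.filter (bMatch up hit)).map Prod.fst) : List String).Nodup :=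
    hndK.sublist ((F.filter_sublist).map Prod.fst)
  have hLm : ∀ ft, ft ∈ (F.filter (bMatch up hit)).map Prod.fst ↔
      ∃ p ∈ F, p.1 = ft ∧ bMatch up hit p = true := by
    intro ft
    simp only [List.mem_map, List.mem_filter]
    tauto
  have hperm : M.Perm ((F.filter (bMatch up hit)).map Prod.fst) :=
    (List.perm_ext_iff_of_nodup hM hLnd).mpr (fun a => (hmem a).trans (hLm a).symm)
  rw [foldl_add_g, foldl_count, bfold]
  simp only [zero_add]
  constructor
  · rw [(hperm.map (fun ft => (wd.lookup ft).getD 0)).sum_eq, List.map_map]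
    simp only [Function.comp_def]
    rw [← sum_map_ite (bMatch up hit) (fun p => (wd.lookup p.1).getD 0) F]
    congr 1
    apply List.map_congr_left
    intro p _
    exact (hitDelta_fst up hit p _ _).symm
  · rw [(hperm.map (fun ft => if (PySem.Set.ofList tmpobs).contains ft then (1 : Int) else 0)).sum_eq,
        List.map_map]
    simp only [Function.comp_def, ofList_contains_eq]
    rw [← sum_map_ite (bMatch up hit) (fun p => if tmpobs.contains p.1 then (1 : Int) else 0) F]
    congr 1
    apply List.map_congr_left
    intro p _
    rw [hitDelta_snd]

theorem matched_eq_fold (fsd : List (String × List String)) (wd : List (String × Int))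
    (tmpobs : List String) (up : List (String × String)) (hit : String)
    (hnd : (fsd.map Prod.fst).Nodup) :
    ((match up.lookup hit with
      | some nid => PySem.Set.union
          (PySem.Set.ofList ((bBuildIndex (fsd.filter (fun p => decide ((wd.lookup p.1).getD 0 ≠ 0)))).getD hit []))
          ((bBuildIndex (fsd.filter (fun p => decide ((wd.lookup p.1).getD 0 ≠ 0)))).getD nid [])
      | none => PySem.Set.ofList ((bBuildIndex (fsd.filter (fun p => decide ((wd.lookup p.1).getD 0 ≠ 0)))).getD hit [])).foldl
        (fun s ft => s + (wd.lookup ft).getD 0) 0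
      = ((fsd.filter (fun p => decide ((wd.lookup p.1).getD 0 ≠ 0))).foldl (bHitScore wd tmpobs up hit) (0, 0)).1) ∧
    ((match up.lookup hit with
      | some nid => PySem.Set.union
          (PySem.Set.ofList ((bBuildIndex (fsd.filter (fun p => decide ((wd.lookup p.1).getD 0 ≠ 0)))).getD hit []))
          ((bBuildIndex (fsd.filter (fun p => decide ((wd.lookup p.1).getD 0 ≠ 0)))).getD nid [])
      | none => PySem.Set.ofList ((bBuildIndex (fsd.filter (fun p => decide ((wd.lookup p.1).getD 0 ≠ 0)))).getD hit [])).foldl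
        (fun c ft => if (PySem.Set.ofList tmpobs).contains ft then c + 1 else c) (0 : Int)
      = ((fsd.filter (fun p => decide ((wd.lookup p.1).getD 0 ≠ 0))).foldl (bHitScore wd tmpobs up hit) (0, 0)).2) := by
  have hndK : ((fsd.filter (fun p => decide ((wd.lookup p.1).getD 0 ≠ 0))).map Prod.fst).Nodup :=
    hnd.sublist ((fsd.filter_sublist).map Prod.fst)
  cases hlk : up.lookup hit with
  | none =>
      apply matched_sums wd tmpobs up hit _ hndK _ (PySem.Set.nodup_ofList _)
      intro ft
      simp only [PySem.Set.mem_ofList, mem_buildIndex, bMatch, hlk, Bool.or_eq_true,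
        List.contains_iff_mem, Bool.false_eq_true, or_false]
  | some nid =>
      apply matched_sums wd tmpobs up hit _ hndK _
        (PySem.Set.nodup_union _ _ (PySem.Set.nodup_ofList _))
      intro ft
      simp only [PySem.Set.mem_union, PySem.Set.mem_ofList, mem_buildIndex, bMatch, hlk,
        Bool.or_eq_true, List.contains_iff_mem]
      constructor
      · rintro (⟨p, hp, rfl, hm⟩ | ⟨p, hp, rfl, hm⟩)
        · exact ⟨p, hp, rfl, Or.inl hm⟩
        · exact ⟨p, hp, rfl, Or.inr hm⟩
      · rintro ⟨p, hp, rfl, (hm | hm)⟩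
        · exact Or.inl ⟨p, hp, rfl, hm⟩
        · exact Or.inr ⟨p, hp, rfl, hm⟩

-- ===== VERDICT (by name: the statement is the Claim_ definition above) =====
theorem check_against_needs_spec : Claim_equal_check_against_needs := by
  unfold Claim_equal_check_against_needs
  intro fsd wd obh tmpobs obstarget up _hDom hPre
  obtain ⟨_hTot, hndF, _hndW, hndO, _hndU⟩ := hPre
  unfold Spec_check_against_needs check_against_needs check_against_needs_alt
  have H := outer_spec fsd wd tmpobs up (obh.map Prod.fst) hndO
  obtain ⟨hP, hK, hV⟩ := H
  by_cases he : (fsd.filter (fun p => decide ((wd.lookup p.1).getD 0 ≠ 0))).isEmpty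
  · simp only [he, if_true, ite_true] at hK ⊢
    rw [hK, List.foldl_nil]
  · simp only [he, Bool.false_eq_true, if_false, ite_false] at hK ⊢
    rw [hK, PySem.Set.ofList_eq_self_of_nodup _ hndO]
    rw [foldl_appendAt_keys]
    · apply List.map_congr_left
      intro q hq
      have hm : q.1 ∈ obh.map Prod.fst := List.mem_map_of_mem hq
      have hbr := matched_eq_fold fsd wd tmpobs up q.1 hndF
      rw [(hV q.1 hm).1, (hV q.1 hm).2, ← hbr.1, ← hbr.2]
    · exact hndO
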